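-- pv_equiv track=rewrite | github.com/three-rocketeers/DistriPP | app.py | get_estimate_string
-- ===== SOURCE A (Python) =====
-- from collections import Counter
--
-- def get_estimate_string(estimates):
--     est_num = []
--     for est in estimates:
--         if est["estimate"].isdigit():
--             est_num.append(int(est["estimate"]))
--     all_identical = est_num[1:] == est_num[:-1]
--     ranked = Counter(est_num).most_common(1)
--     if ranked:
--         result = str(ranked[0][0])
--         if not all_identical:
--             result += " (!)"
--     else:
--         result = '-'
--     return result
-- ===== SOURCE B (Python) =====
-- def get_estimate_string(estimates):
--     # Brute-force mode, no Counter/dict: the first value whose occurrence count is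
--     # strictly greatest wins (= most_common tie-break); unanimity iff that count
--     # equals len(nums).
--     nums = [int(e["estimate"]) for e in estimates if e["estimate"].isdigit()]
--     if not nums:
--         return '-'
--     best, best_c = nums[0], nums.count(nums[0])
--     for v in nums[1:]:
--         c = nums.count(v)
--         if c > best_c:
--             best, best_c = v, c
--     if best_c == len(nums):
--         return str(best)
--     return str(best) + " (!)"
-- ===== Notes on version B (the rewrite author's own statement) =====
-- stated objective: alternative
-- what changed: Drops Counter and all dictionaries: the mode is found by a quadratic scan that recounts each value with list.count and keeps the first value with strictly greatest count, and unanimity is detected by that count equalling len(nums) instead of comparing slices.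
import Mathlib
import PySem

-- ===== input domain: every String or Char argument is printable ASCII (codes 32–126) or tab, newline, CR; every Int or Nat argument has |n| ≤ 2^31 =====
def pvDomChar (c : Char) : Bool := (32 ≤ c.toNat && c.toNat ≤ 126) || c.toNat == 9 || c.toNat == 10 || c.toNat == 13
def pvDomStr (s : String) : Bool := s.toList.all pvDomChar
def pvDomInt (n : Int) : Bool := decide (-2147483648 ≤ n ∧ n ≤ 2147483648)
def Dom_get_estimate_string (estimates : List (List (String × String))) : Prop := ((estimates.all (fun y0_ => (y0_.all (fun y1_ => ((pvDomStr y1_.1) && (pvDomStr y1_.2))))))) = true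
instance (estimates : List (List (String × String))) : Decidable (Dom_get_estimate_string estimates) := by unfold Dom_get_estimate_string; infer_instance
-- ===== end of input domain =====

-- B drops Counter and all dictionaries: brute-force mode via list.count recounts
-- (first strictly-greatest value wins) and unanimity via count == len
-- (objective: alternative algorithm, not faster).

-- ===== PORT A =====
-- est["estimate"]: KeyError when the key is missing → excluded by Pre_; the `.getD ""`
-- is only reached outside Pre_.  int(s) is guarded by s.isdigit(), where ofStr? is
-- some on the ASCII domain, so `.getD 0` is never the raising case inside Dom.
def get_estimate_string (estimates : List (List (String × String))) : String :=
  let est_num : List Int := estimates.foldl (fun acc est =>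
    if PySem.Str.strIsdigit (((PySem.Dict.mk est).get? "estimate").getD "") then
      acc ++ [(PySem.Int.ofStr? (((PySem.Dict.mk est).get? "estimate").getD "")).getD 0]
    else acc) []
  let all_identical := PySem.List.slice est_num (some 1) none == PySem.List.slice est_num none (some (-1))
  let ranked := (PySem.List.sorted (PySem.Dict.counter est_num).items (fun p => p.2) true).take 1
  match ranked with
  | [] => "-"
  | (k, _) :: _ =>
    let result := PySem.Int.toStr k
    if !all_identical then result ++ " (!)" else result

-- ===== PORT B =====
def get_estimate_string_alt (estimates : List (List (String × String))) : String :=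
  let nums : List Int := (estimates.filter (fun e =>
      PySem.Str.strIsdigit (((PySem.Dict.mk e).get? "estimate").getD ""))).map
    (fun e => (PySem.Int.ofStr? (((PySem.Dict.mk e).get? "estimate").getD "")).getD 0)
  match nums with
  | [] => "-"
  | h :: t =>
    let best := (PySem.List.slice (h :: t) (some 1) none).foldl
      (fun (b : Int × Int) v =>
        if ((h :: t).count v : Int) > b.2 then (v, ((h :: t).count v : Int)) else b)
      (h, ((h :: t).count h : Int))
    if best.2 == ((h :: t).length : Int) then PySem.Int.toStr best.1
    else PySem.Int.toStr best.1 ++ " (!)"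

-- ===== PRECONDITION & SPEC =====
-- Pre_ excludes exactly the inputs on which Python A raises KeyError: an inner dict
-- without the key "estimate" (B raises there too).
def Pre_get_estimate_string (estimates : List (List (String × String))) : Prop :=
  ∀ est ∈ estimates, (PySem.Dict.mk est).contains "estimate" = true
instance (estimates : List (List (String × String))) : Decidable (Pre_get_estimate_string estimates) := by unfold Pre_get_estimate_string; infer_instance
def pvWitness_get_estimate_string : (List (List (String × String))) :=
  [[("estimate", "3")], [("estimate", "4")], [("estimate", "3")]]
def Spec_get_estimate_string (estimates : List (List (String × String))) (out : String) : Prop := out = get_estimate_string_alt estimates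
instance (estimates : List (List (String × String))) (out : String) : Decidable (Spec_get_estimate_string estimates out) := by unfold Spec_get_estimate_string; infer_instance

-- ===== CLAIM =====
def Claim_equal_get_estimate_string : Prop := ∀ (estimates : List (List (String × String))), Dom_get_estimate_string estimates → Pre_get_estimate_string estimates → Spec_get_estimate_string estimates (get_estimate_string estimates)

-- ===== LEMMAS AND PROOFS =====

/-- The numeric estimates both programs extract: digit-string values, in order. -/
def pvNums (l : List (List (String × String))) : List Int :=
  (l.filter (fun est => PySem.Str.strIsdigit (((PySem.Dict.mk est).get? "estimate").getD ""))).map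
    (fun est => (PySem.Int.ofStr? (((PySem.Dict.mk est).get? "estimate").getD "")).getD 0)

theorem pv_Afold (l : List (List (String × String))) :
    l.foldl (fun acc est =>
      if PySem.Str.strIsdigit (((PySem.Dict.mk est).get? "estimate").getD "") then
        acc ++ [(PySem.Int.ofStr? (((PySem.Dict.mk est).get? "estimate").getD "")).getD 0]
      else acc) ([] : List Int) = pvNums l := by
  rw [PySem.List.foldl_append_if]
  rfl

/-- B's argmax step over values, recounting in the fixed list `nums`. -/
def pvStep (nums : List Int) (b : Int × Int) (v : Int) : Int × Int :=
  if (nums.count v : Int) > b.2 then (v, (nums.count v : Int)) else b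

/-- A's argmax step over (value, count) pairs. -/
def pvStepP (b q : Int × Int) : Int × Int := if q.2 > b.2 then q else b

/-- `sift seen t` = the elements of `t` not in `seen`, first occurrences only. -/
def pvSift (seen : List Int) : List Int → List Int
  | [] => []
  | v :: t => if v ∈ seen then pvSift seen t else v :: pvSift (v :: seen) t

theorem pvSift_congr (t : List Int) : ∀ s₁ s₂ : List Int, (∀ v, v ∈ s₁ ↔ v ∈ s₂) →
    pvSift s₁ t = pvSift s₂ t := by
  induction t with
  | nil => intro _ _ _; rfl
  | cons v t ih =>
    intro s₁ s₂ hmem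
    by_cases hv : v ∈ s₁
    · simp only [pvSift, if_pos hv, if_pos ((hmem v).1 hv)]
      exact ih s₁ s₂ hmem
    · have hv₂ : v ∉ s₂ := fun h => hv ((hmem v).2 h)
      simp only [pvSift, if_neg hv, if_neg hv₂]
      rw [ih (v :: s₁) (v :: s₂) (by intro w; simp [hmem w])]

/-- Building a `PySem.Set` by fold = append the sifted new elements. -/
theorem pv_ofList_sift (t : List Int) : ∀ s : PySem.Set Int,
    t.foldl PySem.Set.add s = s ++ pvSift s t := by
  induction t with
  | nil => intro s; simp [pvSift]
  | cons v t ih =>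
    intro s
    by_cases hv : v ∈ s
    · have h1 : PySem.Set.add s v = s := by
        simp [PySem.Set.add, PySem.Set.contains, hv]
      simp only [List.foldl_cons, h1, pvSift, if_pos hv]
      exact ih s
    · have h1 : PySem.Set.add s v = s ++ [v] := by
        simp [PySem.Set.add, PySem.Set.contains, hv]
      simp only [List.foldl_cons, h1, pvSift, if_neg hv]
      rw [ih (s ++ [v]),
        pvSift_congr t (s ++ [v]) (v :: s) (by intro w; constructor <;> (intro h; simp at h ⊢; tauto)),
        List.append_assoc]
      rfl

/-- Folding B's step over the sifted list is the same as over the full list: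
    elements of `seen` (count already ≤ best) never update. -/
theorem pv_sift_fold (nums : List Int) (t : List Int) :
    ∀ (seen : List Int) (b : Int × Int), (∀ s ∈ seen, (nums.count s : Int) ≤ b.2) →
    t.foldl (pvStep nums) b = (pvSift seen t).foldl (pvStep nums) b := by
  induction t with
  | nil => intro _ _ _; rfl
  | cons v t ih =>
    intro seen b hseen
    by_cases hv : v ∈ seen
    · have hstep : pvStep nums b v = b := by
        have := hseen v hv
        simp [pvStep]; omega
      simp only [List.foldl_cons, hstep, pvSift, if_pos hv]
      exact ih seen b hseen
    · simp only [List.foldl_cons, pvSift, if_neg hv]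
      apply ih (v :: seen)
      intro s hs
      rcases List.mem_cons.1 hs with rfl | hs
      · by_cases hc : (nums.count s : Int) > b.2
        · simp [pvStep, hc]
        · simp [pvStep, hc]; omega
      · have := hseen s hs
        by_cases hc : (nums.count v : Int) > b.2 <;> simp [pvStep, hc] <;> omega

/-- Folding over the (value, count) pairs = folding B's step over the values. -/
theorem pv_map_fold (nums : List Int) (l : List Int) :
    ∀ b : Int × Int,
    (l.map (fun k => (k, (nums.count k : Int)))).foldl pvStepP b = l.foldl (pvStep nums) b := by
  induction l with
  | nil => intro _; rfl
  | cons v l ih =>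
    intro b
    simp only [List.map_cons, List.foldl_cons]
    rw [ih]
    rfl

/-- Invariant of B's fold: the best pair is a value of `nums` with its true count,
    and the best count never decreases. -/
theorem pv_fold_inv (nums : List Int) (t : List Int) :
    ∀ b : Int × Int, b.1 ∈ nums → b.2 = (nums.count b.1 : Int) → (∀ v ∈ t, v ∈ nums) →
    (t.foldl (pvStep nums) b).1 ∈ nums ∧
    (t.foldl (pvStep nums) b).2 = (nums.count (t.foldl (pvStep nums) b).1 : Int) ∧
    b.2 ≤ (t.foldl (pvStep nums) b).2 := by
  induction t with
  | nil => intro b h1 h2 _; exact ⟨h1, h2, le_refl _⟩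
  | cons v t ih =>
    intro b h1 h2 hmem
    simp only [List.foldl_cons]
    by_cases hc : (nums.count v : Int) > b.2
    · have hstep : pvStep nums b v = (v, (nums.count v : Int)) := by simp [pvStep, hc]
      rw [hstep]
      obtain ⟨a1, a2, a3⟩ := ih (v, (nums.count v : Int)) (hmem v (by simp)) rfl
        (fun w hw => hmem w (by simp [hw]))
      exact ⟨a1, a2, by simp at a3 ⊢; omega⟩
    · have hstep : pvStep nums b v = b := by simp [pvStep]; omega
      rw [hstep]
      exact ih b h1 h2 (fun w hw => hmem w (by simp [hw]))

/-- If every element of `t` equals `h`, B's fold never updates. -/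
theorem pv_fold_const (nums : List Int) (t : List Int) (h : Int)
    (hall : ∀ v ∈ t, v = h) :
    t.foldl (pvStep nums) (h, (nums.count h : Int)) = (h, (nums.count h : Int)) := by
  induction t with
  | nil => rfl
  | cons v t ih =>
    have hv : v = h := hall v (by simp)
    subst hv
    simp only [List.foldl_cons]
    have hstep : pvStep nums (v, (nums.count v : Int)) v = (v, (nums.count v : Int)) := by
      simp [pvStep]
    rw [hstep]
    exact ih (fun w hw => hall w (by simp [hw]))

/-- `l[1:] == l[:-1]` on `h :: t` is `t.all (· == h)`. -/
theorem pv_tail_dropLast (h : Int) (t : List Int) :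
    (t == (h :: t).dropLast) = t.all (· == h) := by
  rw [Bool.eq_iff_iff]
  simp only [beq_iff_eq, List.all_eq_true, beq_iff_eq]
  induction t generalizing h with
  | nil => simp
  | cons b t2 ih =>
    rw [List.dropLast_cons₂, List.cons.injEq]
    simp only [List.forall_mem_cons]
    rw [ih b]
    constructor
    · rintro ⟨rfl, h2⟩; exact ⟨rfl, h2⟩
    · rintro ⟨rfl, h2⟩; exact ⟨rfl, h2⟩

theorem pv_head_foldl_insertBy (l : List (Int × Int)) :
    ∀ (acc : List (Int × Int)) (h : Int × Int), acc.head? = some h →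
    (l.foldl (fun acc x => PySem.List.insertBy (fun a b => decide (b.2 < a.2)) x acc) acc).head?
      = some (l.foldl pvStepP h) := by
  induction l with
  | nil => intro acc h hh; simpa using hh
  | cons x l ih =>
    intro acc h hh
    cases acc with
    | nil => simp at hh
    | cons a t =>
      simp only [List.head?_cons, Option.some.injEq] at hh
      subst hh
      simp only [List.foldl_cons]
      apply ih
      by_cases hc : a.2 < x.2
      · simp [PySem.List.insertBy, hc, pvStepP]
      · simp [PySem.List.insertBy, hc, pvStepP]

theorem pv_head_sorted_rev (q : Int × Int) (rest : List (Int × Int)) :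
    (PySem.List.sorted (q :: rest) (fun p => p.2) true).head?
      = some (rest.foldl pvStepP q) := by
  rw [PySem.List.sorted_rev_eq_foldl_insertBy]
  simp only [List.foldl_cons]
  exact pv_head_foldl_insertBy rest (PySem.List.insertBy (fun a b => decide (b.2 < a.2)) q []) q rfl

/-- Core equality on the extracted numeric list. -/
theorem pv_main (nums : List Int) :
    (let est_num := nums
     let all_identical := PySem.List.slice est_num (some 1) none == PySem.List.slice est_num none (some (-1))
     let ranked := (PySem.List.sorted (PySem.Dict.counter est_num).items (fun p => p.2) true).take 1
     match ranked with
     | [] => "-"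
     | (k, _) :: _ =>
       let result := PySem.Int.toStr k
       if !all_identical then result ++ " (!)" else result)
    = (match nums with
       | [] => "-"
       | h :: t =>
         let best := (PySem.List.slice (h :: t) (some 1) none).foldl
           (fun (b : Int × Int) v =>
             if ((h :: t).count v : Int) > b.2 then (v, ((h :: t).count v : Int)) else b)
           (h, ((h :: t).count h : Int))
         if best.2 == ((h :: t).length : Int) then PySem.Int.toStr best.1
         else PySem.Int.toStr best.1 ++ " (!)") := by
  cases nums with
  | nil => rfl
  | cons h t =>
    simp only [PySem.List.slice_from_one, PySem.List.slice_to_neg_one, List.tail_cons]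
    have hfold : (fun (b : Int × Int) v =>
        if ((h :: t).count v : Int) > b.2 then (v, ((h :: t).count v : Int)) else b)
        = pvStep (h :: t) := by
      funext b v; rfl
    rw [hfold]
    -- A's items: dedup of nums paired with counts
    have hitems : (PySem.Dict.counter (h :: t)).items
        = (h, ((h :: t).count h : Int)) ::
          (pvSift [h] t).map (fun k => (k, ((h :: t).count k : Int))) := by
      rw [PySem.Dict.items_counter]
      have hofl : PySem.Set.ofList (h :: t) = h :: pvSift [h] t := by
        rw [PySem.Set.ofList_eq_foldl]
        simp only [List.foldl_cons]
        have : PySem.Set.add ([] : PySem.Set Int) h = [h] := rfl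
        rw [this, pv_ofList_sift t [h]]
        rfl
      rw [hofl]
      simp
    rw [hitems]
    have hbest : (pvSift [h] t).foldl (pvStep (h :: t)) (h, ((h :: t).count h : Int))
        = t.foldl (pvStep (h :: t)) (h, ((h :: t).count h : Int)) := by
      rw [← pv_sift_fold (h :: t) t [h] (h, ((h :: t).count h : Int))
        (by intro s hs; simp at hs; subst hs; simp)]
    set b0 : Int × Int := (h, ((h :: t).count h : Int)) with hb0
    set best := t.foldl (pvStep (h :: t)) b0 with hbestdef
    -- head of A's sorted list is the same best pair
    have hsorted := pv_head_sorted_rev (h, ((h :: t).count h : Int))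
      ((pvSift [h] t).map (fun k => (k, ((h :: t).count k : Int))))
    rw [pv_map_fold, hbest] at hsorted
    -- all-identical ↔ best count = length
    have hinv := pv_fold_inv (h :: t) t b0 (by simp [hb0]) (by simp [hb0])
      (fun v hv => by simp [hv])
    rw [← hbestdef] at hinv
    obtain ⟨hmem, hcnt, hmono⟩ := hinv
    have hiff : (t.all (· == h)) = (best.2 == ((h :: t).length : Int)) := by
      rw [Bool.eq_iff_iff]
      simp only [List.all_eq_true, beq_iff_eq]
      constructor
      · intro hall
        have : best = b0 := pv_fold_const (h :: t) t h hall
        rw [this, hb0]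
        have : (h :: t).count h = (h :: t).length :=
          List.count_eq_length.2 (by
            intro b hb
            rcases List.mem_cons.1 hb with rfl | hb
            · rfl
            · exact (hall b hb).symm)
        simp [this]
      · intro hlen
        have hcl : (h :: t).count best.1 = (h :: t).length := by
          rw [hcnt] at hlen
          exact_mod_cast hlen
        have hallb := List.count_eq_length.1 hcl
        intro v hv
        rw [← hallb h (by simp), ← hallb v (by simp [hv])]
    -- finish by cases on the sorted list and the flag
    cases hs : PySem.List.sorted
        ((h, ((h :: t).count h : Int)) ::
          (pvSift [h] t).map (fun k => (k, ((h :: t).count k : Int)))) (fun p => p.2) true with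
    | nil => rw [hs] at hsorted; simp at hsorted
    | cons m tl =>
      rw [hs] at hsorted
      simp only [List.head?_cons, Option.some.injEq] at hsorted
      simp only [List.take_succ_cons, List.take_zero]
      rw [hsorted]
      rw [pv_tail_dropLast h t] at *
      rw [hiff]
      cases hflag : (best.2 == ((h :: t).length : Int)) <;> simp

-- ===== VERDICT (by name: the statement is the Claim_ definition above) =====
theorem get_estimate_string_spec : Claim_equal_get_estimate_string := by
  intro estimates hdom hpre
  unfold Spec_get_estimate_string get_estimate_string get_estimate_string_alt
  rw [pv_Afold estimates]
  exact pv_main (pvNums estimates)
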